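-- pv_equiv track=rewrite | github.com/tahmid-bhuiyan/100-Days-of-Code | BasicProjects/Loops&Lists.py | any_adjacent_combustibles
-- ===== SOURCE A (Python) =====
-- def any_adjacent_combustibles(names, combustibles):
-- #declares variable i to be used later
-- 	i = 0
-- #if names list is empty, return false
-- 	if len(names) == 0:
-- 		return False
-- #iterates x over range of names
-- 	for x in range(len(names)):
-- #if the name is combustible, execute
-- 		if names[x] in combustibles:
-- #one iteration passed
-- 			i += 1
-- #two iterations in a row mean theyre next to eachother
-- 			if i >= 2:
-- 				return True
-- #if we are on the last name and none next to eachother, return false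
-- 			elif x == len(names) - 1:
-- 				return False
-- #else continue the function
-- 			else:
-- 				continue
-- #if we are on the last name and none next to eachother, return false
-- 		elif x == len(names) - 1:
-- 			return False
-- #none next eachother, set i equal back to 0
-- 		else:
-- 			i = 0
-- ===== SOURCE B (Python) =====
-- def any_adjacent_combustibles(names, combustibles):
--     for a, b in zip(names, names[1:]):
--         if a in combustibles and b in combustibles:
--             return True
--     return False
-- ===== Notes on version B (the rewrite author's own statement) =====
-- stated objective: simpler
-- what changed: Replaced the index loop with a run-length counter and per-index last-element checks by a direct scan over adjacent pairs (zip of the list with its tail), returning True on the first pair whose both elements are combustible.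
import Mathlib
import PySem

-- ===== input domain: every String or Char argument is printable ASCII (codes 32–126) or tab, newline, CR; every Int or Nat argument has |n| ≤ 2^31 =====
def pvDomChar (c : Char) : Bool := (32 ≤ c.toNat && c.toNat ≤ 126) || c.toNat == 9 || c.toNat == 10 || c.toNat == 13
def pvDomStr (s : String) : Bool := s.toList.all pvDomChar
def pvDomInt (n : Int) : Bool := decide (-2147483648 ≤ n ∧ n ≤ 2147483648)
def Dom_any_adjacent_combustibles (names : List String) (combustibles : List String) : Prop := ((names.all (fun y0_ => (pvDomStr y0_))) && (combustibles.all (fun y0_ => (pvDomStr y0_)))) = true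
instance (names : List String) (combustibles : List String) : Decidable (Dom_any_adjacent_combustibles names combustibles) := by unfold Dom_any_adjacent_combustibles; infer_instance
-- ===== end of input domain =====

-- B replaces A's index loop with run-length counter by a direct scan over adjacent
-- pairs (zip of the list with its tail); same return value, simpler decomposition.

-- ===== PORT A =====
-- the 'for x in range(len(names))' loop with counter state i; early returns become results
def pvALoop (names : List String) (combustibles : List String) : List Int → Int → Bool
  | [], _ => false            -- loop exhausted (unreachable for nonempty names: Python always returns inside)
  | x :: rest, i =>
    match PySem.List.pyGet? names x with
    | none => false           -- unreachable: x ∈ range(len(names))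
    | some nm =>
      if combustibles.contains nm then
        if i + 1 ≥ 2 then true
        else if x = (names.length : Int) - 1 then false
        else pvALoop names combustibles rest (i + 1)
      else if x = (names.length : Int) - 1 then false
      else pvALoop names combustibles rest 0

def any_adjacent_combustibles (names : List String) (combustibles : List String) : Bool :=
  if names.length = 0 then false
  else pvALoop names combustibles (PySem.List.pyRange 0 names.length 1) 0

-- ===== PORT B =====
-- 'for a, b in zip(names, names[1:])'
def pvBLoop (combustibles : List String) : List (String × String) → Bool
  | [] => false
  | (a, b) :: rest =>
    if combustibles.contains a && combustibles.contains b then true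
    else pvBLoop combustibles rest

def any_adjacent_combustibles_alt (names : List String) (combustibles : List String) : Bool :=
  pvBLoop combustibles (names.zip (PySem.List.slice names (some 1) none))

-- ===== PRECONDITION & SPEC =====
def Spec_any_adjacent_combustibles (names : List String) (combustibles : List String) (out : Bool) : Prop := out = any_adjacent_combustibles_alt names combustibles
instance (names : List String) (combustibles : List String) (out : Bool) : Decidable (Spec_any_adjacent_combustibles names combustibles out) := by unfold Spec_any_adjacent_combustibles; infer_instance

-- ===== CLAIM (what is proved, stated in full; the proofs are below) =====
def Claim_equal_any_adjacent_combustibles : Prop := ∀ (names : List String) (combustibles : List String), Dom_any_adjacent_combustibles names combustibles → Spec_any_adjacent_combustibles names combustibles (any_adjacent_combustibles names combustibles)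

-- ===== LEMMAS AND PROOFS =====

-- proof-side characterisation: scan with a Bool 'previous name was combustible' flag
def pvPairScan (c : List String) : List String → Bool → Bool
  | [], _ => false
  | a :: rest, prev =>
    if c.contains a then (prev || pvPairScan c rest true)
    else pvPairScan c rest false

-- A's loop from index x with counter i ∈ {0,1} equals the pairScan of the suffix
lemma pvALoop_eq_pairScan (names c : List String) :
    ∀ (k x : Nat) (i : Int), names.length - x = k → (i = 0 ∨ i = 1) →
      pvALoop names c (PySem.List.pyRange (x : Int) (names.length : Int) 1) i
        = pvPairScan c (names.drop x) (decide (i = 1)) := by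
  intro k
  induction k with
  | zero =>
    intro x i hk _
    have hxe : names.length ≤ x := by omega
    rw [PySem.List.pyRange_one_eq_nil (by exact_mod_cast hxe)]
    rw [List.drop_eq_nil_of_le hxe]
    simp [pvALoop, pvPairScan]
  | succ k ih =>
    intro x i hk hi
    have hx : x < names.length := by omega
    rw [PySem.List.pyRange_one_cons (by exact_mod_cast hx)]
    have hdrop : names.drop x = names[x] :: names.drop (x + 1) :=
      (List.getElem_cons_drop hx).symm
    rw [hdrop]
    simp only [pvALoop, PySem.List.pyGet?_natCast, List.getElem?_eq_getElem hx]
    by_cases hc : c.contains names[x]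
    · have hm : names[x] ∈ c := by simpa using hc
      simp only [hc, if_true]
      rcases hi with h0 | h1
      · subst h0
        have hne2 : ¬ ((0 : Int) + 1 ≥ 2) := by omega
        simp only [hne2, if_false, pvPairScan, hc, if_true]
        by_cases hlast : x = names.length - 1
        · have : (x : Int) = (names.length : Int) - 1 := by omega
          rw [if_pos this]
          have : names.drop (x + 1) = [] := List.drop_eq_nil_of_le (by omega)
          simp [this, pvPairScan]
        · have : ¬ ((x : Int) = (names.length : Int) - 1) := by omega
          rw [if_neg this]
          have hcast : ((x : Int) + 1) = ((x + 1 : Nat) : Int) := by push_cast; ring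
          have h01 : (0 : Int) + 1 = 1 := by norm_num
          have hih := ih (x + 1) 1 (by omega) (Or.inr rfl)
          rw [h01, hcast, hih]
          simp
      · subst h1
        have h2 : ((1 : Int) + 1 ≥ 2) := by omega
        simp [pvPairScan, hm]
    · have hm : names[x] ∉ c := by simpa using hc
      simp only [hc, if_false, Bool.false_eq_true]
      by_cases hlast : x = names.length - 1
      · have : (x : Int) = (names.length : Int) - 1 := by omega
        rw [if_pos this]
        have hnil : names.drop (x + 1) = [] := List.drop_eq_nil_of_le (by omega)
        simp [pvPairScan, hm, hnil]
      · have : ¬ ((x : Int) = (names.length : Int) - 1) := by omega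
        rw [if_neg this]
        have hcast : ((x : Int) + 1) = ((x + 1 : Nat) : Int) := by push_cast; ring
        rw [hcast, ih (x + 1) 0 (by omega) (Or.inl rfl)]
        simp [pvPairScan, hm]

-- the pairScan started with flag false equals B's zip-with-tail loop
lemma pvPairScan_eq_bLoop (c : List String) :
    ∀ (l : List String), pvPairScan c l false = pvBLoop c (l.zip l.tail) := by
  intro l
  induction l with
  | nil => simp [pvPairScan, pvBLoop]
  | cons a rest ih =>
    cases rest with
    | nil =>
      by_cases ha : a ∈ c <;> simp [pvPairScan, pvBLoop, ha]
    | cons b rest' =>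
      simp only [List.tail_cons] at ih
      simp only [List.tail_cons, List.zip_cons_cons, pvBLoop, pvPairScan]
      rw [← ih]
      by_cases ha : a ∈ c <;> by_cases hb : b ∈ c <;>
        simp [pvPairScan, ha, hb]

-- ===== VERDICT (by name: the statement is the Claim_ definition above) =====
theorem any_adjacent_combustibles_spec : Claim_equal_any_adjacent_combustibles := by
  intro names combustibles _
  unfold Spec_any_adjacent_combustibles any_adjacent_combustibles any_adjacent_combustibles_alt
  rw [PySem.List.slice_from_one]
  cases names with
  | nil => simp [pvBLoop]
  | cons a rest =>
    rw [if_neg (by simp)]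
    have h := pvALoop_eq_pairScan (a :: rest) combustibles (a :: rest).length 0 0 (by omega) (Or.inl rfl)
    simpa [pvPairScan_eq_bLoop] using h
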